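-- pv_equiv track=rewrite | github.com/exveria1015/cocoindex-code | src/cocoindex_code/query.py | _normalize_path_pattern
-- ===== SOURCE A (Python) =====
-- def _normalize_path_pattern(pattern: str) -> str:
--     normalized = pattern.strip().replace("\\", "/")
--     while normalized.startswith("./"):
--         normalized = normalized[2:]
--     while "//" in normalized:
--         normalized = normalized.replace("//", "/")
--     if normalized != "/":
--         normalized = normalized.rstrip("/")
--     return normalized
-- ===== SOURCE B (Python) =====
-- def _normalize_path_pattern(pattern: str) -> str:
--     s = pattern.strip().replace("\\", "/")
--     # skip the maximal leading run of "./" pairs by index, no restring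
--     i = 0
--     while i + 1 < len(s) and s[i] == "." and s[i + 1] == "/":
--         i += 2
--     # single pass: copy chars, collapsing every run of '/' to one
--     out = []
--     for c in s[i:]:
--         if not (c == "/" and out and out[-1] == "/"):
--             out.append(c)
--     # runs are collapsed, so at most one trailing '/': drop it unless it is the whole string
--     if len(out) > 1 and out[-1] == "/":
--         out.pop()
--     return "".join(out)
-- ===== Notes on version B (the rewrite author's own statement) =====
-- stated objective: alternative
-- what changed: A repeatedly re-slices the string for each leading './' and re-runs whole-string replace('//','/') passes until no '//' remains, then rstrips; B skips the leading './' run with one index scan and collapses slash runs in a single accumulating pass, dropping the at-most-one trailing slash directly.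
import Mathlib
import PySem

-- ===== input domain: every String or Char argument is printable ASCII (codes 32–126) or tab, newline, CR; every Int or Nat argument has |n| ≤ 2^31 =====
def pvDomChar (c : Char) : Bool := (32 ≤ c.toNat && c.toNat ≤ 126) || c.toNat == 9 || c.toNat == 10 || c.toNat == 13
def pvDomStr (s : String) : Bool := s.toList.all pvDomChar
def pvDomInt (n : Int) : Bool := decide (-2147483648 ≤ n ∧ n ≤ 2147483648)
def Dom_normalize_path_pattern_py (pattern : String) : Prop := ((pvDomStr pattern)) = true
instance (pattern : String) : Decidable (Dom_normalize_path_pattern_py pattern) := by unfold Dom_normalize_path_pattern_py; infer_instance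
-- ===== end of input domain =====

-- B replaces A's repeated whole-string replace("//","/") passes and re-slicing "./" loop by one
-- index scan plus one accumulating pass over the characters (objective: alternative single-pass form).

-- ===== PORT A =====
-- while normalized.startswith("./"): normalized = normalized[2:]
def aDropDots (l : List Char) : List Char :=
  if h : PySem.Chars.startswith l ['.', '/'] = true then
    aDropDots (PySem.List.slice l (some 2) none)
  else l
termination_by l.length
decreasing_by
  rcases (PySem.Chars.startswith_iff l ['.', '/']).mp h with ⟨t, ht⟩
  subst ht
  simp [PySem.List.slice_from (xs := ('.' :: '/' :: t : List Char)) (a := 2) (by norm_num)]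

-- while "//" in normalized: normalized = normalized.replace("//", "/")
-- (fuel-counted while loop; each pass shrinks the string, so fuel = length suffices — proved below)
def aCollapseFuel : Nat → List Char → List Char
  | 0, l => l
  | fuel + 1, l =>
    if PySem.Chars.isIn ['/', '/'] l = true then
      aCollapseFuel fuel (PySem.Chars.replace l ['/', '/'] ['/'])
    else l

-- hand port of normalized.rstrip("/") (strip set is the single char '/'): exact — removes all trailing '/'
def aRstripSlash (l : List Char) : List Char := (l.reverse.dropWhile (· = '/')).reverse

def normalize_path_pattern_py (pattern : String) : String :=
  let n0 := PySem.Str.replace (PySem.Str.strip pattern) "\\" "/"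
  let n1 := aDropDots n0.toList
  let n2 := aCollapseFuel n1.length n1
  if String.ofList n2 ≠ "/" then String.ofList (aRstripSlash n2) else String.ofList n2

-- ===== PORT B =====
-- while i + 1 < len(s) and s[i] == "." and s[i+1] == "/": i += 2   (bounds-checked indexing via getElem?)
def bScan (s : List Char) (i : Nat) : Nat :=
  if h : s[i]? = some '.' ∧ s[i + 1]? = some '/' then bScan s (i + 2) else i
termination_by s.length - i
decreasing_by
  rcases (List.getElem?_eq_some_iff.mp h.2) with ⟨hlt, -⟩
  omega

-- the loop body: out.append(c) unless c == '/' and out and out[-1] == '/'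
def bStep (out : List Char) (c : Char) : List Char :=
  if c = '/' ∧ out ≠ [] ∧ out.getLast? = some '/' then out else out ++ [c]

def normalize_path_pattern_py_alt (pattern : String) : String :=
  let s := PySem.Str.replace (PySem.Str.strip pattern) "\\" "/"
  let sl := s.toList
  let i := bScan sl 0
  let out := (sl.drop i).foldl bStep []     -- for c in s[i:] (i ≤ len(s), so the slice is drop i)
  let out := if 1 < out.length ∧ out.getLast? = some '/' then out.dropLast else out
  String.ofList out

-- ===== PRECONDITION & SPEC =====
def Spec_normalize_path_pattern_py (pattern : String) (out : String) : Prop := out = normalize_path_pattern_py_alt pattern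
instance (pattern : String) (out : String) : Decidable (Spec_normalize_path_pattern_py pattern out) := by unfold Spec_normalize_path_pattern_py; infer_instance

-- ===== CLAIM (what is proved, stated in full; the proofs are below) =====
def Claim_equal_normalize_path_pattern_py : Prop := ∀ (pattern : String), Dom_normalize_path_pattern_py pattern → Spec_normalize_path_pattern_py pattern (normalize_path_pattern_py pattern)

-- ===== LEMMAS AND PROOFS =====

-- one full pass of replace("//","/"), written as structural recursion
def pvRa : List Char → List Char
  | c₁ :: c₂ :: t => if c₁ = '/' ∧ c₂ = '/' then '/' :: pvRa t else c₁ :: pvRa (c₂ :: t)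
  | l => l

-- the mathematical collapse: adjacent slash runs reduced to one
def pvCol : List Char → List Char
  | [] => []
  | [a] => [a]
  | a :: b :: t => if a = '/' ∧ b = '/' then pvCol (b :: t) else a :: pvCol (b :: t)

-- B's fold, tracked by the last emitted character
def pvRem : Option Char → List Char → List Char
  | _, [] => []
  | last, c :: t => if c = '/' ∧ last = some '/' then pvRem last t else c :: pvRem (some c) t

theorem pv_go_spec (fuel : Nat) : ∀ (l acc : List Char), l.length ≤ fuel →
    PySem.Chars.replace.go ['/', '/'] ['/'] fuel l acc = acc.reverse ++ pvRa l := by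
  induction fuel with
  | zero =>
    intro l acc h
    have hl : l = [] := by cases l <;> simp_all
    subst hl
    simp [PySem.Chars.replace.go, pvRa]
  | succ fuel ih =>
    intro l acc h
    match l with
    | [] => simp [PySem.Chars.replace.go, pvRa]
    | c :: t =>
      rw [PySem.Chars.replace.go]
      by_cases hp : List.isPrefixOf ['/', '/'] (c :: t) = true
      · rcases List.isPrefixOf_iff_prefix.mp hp with ⟨u, hu⟩
        cases hu
        simp only [hp, if_pos]
        rw [ih _ _ (by simp at h ⊢; omega)]
        simp [pvRa]
      · simp only [hp, if_neg, Bool.false_eq_true, not_false_iff, if_neg]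
        rw [ih _ _ (by simp at h ⊢; omega)]
        cases t with
        | nil => simp [pvRa]
        | cons d u =>
          have : ¬ (c = '/' ∧ d = '/') := by
            intro ⟨h1, h2⟩; subst h1; subst h2; simp [List.isPrefixOf] at hp
          simp [pvRa, this]

theorem pvRa_length_le (l : List Char) : (pvRa l).length ≤ l.length := by
  induction l using pvRa.induct with
  | case1 c₁ c₂ t h ih => simp [pvRa, h]; omega
  | case2 c₁ c₂ t h ih => simp only [pvRa, if_neg h, List.length_cons]; simp at ih ⊢; omega
  | case3 l h => cases l with
    | nil => simp [pvRa]
    | cons a t => cases t with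
      | nil => simp [pvRa]
      | cons b u => exact absurd rfl (h a b u)

theorem pvRa_length_lt (l : List Char) (h : ['/', '/'] <:+: l) : (pvRa l).length < l.length := by
  induction l using pvRa.induct with
  | case1 c₁ c₂ t hc ih =>
    obtain ⟨h1, h2⟩ := hc; subst h1 h2
    have := pvRa_length_le t
    simp [pvRa]; omega
  | case2 c₁ c₂ t hc ih =>
    have h' : ['/', '/'] <:+: c₂ :: t := by
      rcases List.infix_cons_iff.mp h with hpre | hin
      · obtain ⟨u, hu⟩ := hpre
        injection hu with e1 hu2
        injection hu2 with e2 _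
        exact absurd ⟨e1.symm, e2.symm⟩ hc
      · exact hin
    have hi := ih h'
    simp only [List.length_cons] at hi
    simp only [pvRa, if_neg hc, List.length_cons]
    omega
  | case3 l hl =>
    have h2 := h.length_le
    match l, hl with
    | [], _ => simp at h2
    | [a], _ => simp at h2
    | a :: b :: t, hl => exact absurd rfl (hl a b t)

theorem pvCol_cons_ra (n : Nat) : ∀ (t : List Char), t.length ≤ n → ∀ c, pvCol (c :: pvRa t) = pvCol (c :: t) := by
  induction n with
  | zero =>
    intro t h c
    have : t = [] := by cases t <;> simp_all
    subst this; rfl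
  | succ n ih =>
    intro t h c
    match t with
    | [] => rfl
    | [a] => rfl
    | a :: b :: u =>
      by_cases hab : a = '/' ∧ b = '/'
      · obtain ⟨h1, h2⟩ := hab; subst h1 h2
        simp only [pvRa]
        by_cases hc : c = '/'
        · subst hc
          show pvCol ('/' :: '/' :: pvRa u) = pvCol ('/' :: '/' :: '/' :: u)
          rw [show pvCol ('/' :: '/' :: pvRa u) = pvCol ('/' :: pvRa u) by simp [pvCol]]
          rw [show pvCol ('/' :: '/' :: '/' :: u) = pvCol ('/' :: '/' :: u) by simp [pvCol]]
          rw [show pvCol (('/':Char) :: '/' :: u) = pvCol ('/' :: u) by simp [pvCol]]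
          exact ih u (by simp at h; omega) '/'
        · show pvCol (c :: '/' :: pvRa u) = pvCol (c :: '/' :: '/' :: u)
          rw [show pvCol (c :: '/' :: pvRa u) = c :: pvCol ('/' :: pvRa u) by
            simp [pvCol, hc]]
          rw [show pvCol (c :: '/' :: '/' :: u) = c :: pvCol ('/' :: '/' :: u) by
            simp [pvCol, hc]]
          rw [show pvCol (('/':Char) :: '/' :: u) = pvCol ('/' :: u) by simp [pvCol]]
          rw [ih u (by simp at h; omega) '/']
      · simp only [pvRa, if_neg hab]
        by_cases hca : c = '/' ∧ a = '/'
        · obtain ⟨h1, h2⟩ := hca; subst h1 h2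
          show pvCol ('/' :: '/' :: pvRa (b :: u)) = pvCol ('/' :: '/' :: b :: u)
          rw [show pvCol (('/':Char) :: '/' :: pvRa (b :: u)) = pvCol ('/' :: pvRa (b :: u)) by simp [pvCol]]
          rw [show pvCol (('/':Char) :: '/' :: b :: u) = pvCol ('/' :: b :: u) by simp [pvCol]]
          exact ih (b :: u) (by simp at h ⊢; omega) '/'
        · show pvCol (c :: a :: pvRa (b :: u)) = pvCol (c :: a :: b :: u)
          rw [show pvCol (c :: a :: pvRa (b :: u)) = c :: pvCol (a :: pvRa (b :: u)) by
            cases hra : pvRa (b :: u) <;> simp [pvCol, hca]]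
          rw [show pvCol (c :: a :: b :: u) = c :: pvCol (a :: b :: u) by simp [pvCol, hca]]
          rw [ih (b :: u) (by simp at h ⊢; omega) a]

theorem pvCol_ra (l : List Char) : pvCol (pvRa l) = pvCol l := by
  match l with
  | [] => rfl
  | [a] => rfl
  | a :: b :: u =>
    by_cases hab : a = '/' ∧ b = '/'
    · obtain ⟨h1, h2⟩ := hab; subst h1 h2
      simp only [pvRa]
      rw [show pvCol (('/':Char) :: '/' :: u) = pvCol ('/' :: u) by simp [pvCol]]
      exact pvCol_cons_ra u.length u le_rfl '/'
    · simp only [pvRa, if_neg hab]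
      exact pvCol_cons_ra (b :: u).length (b :: u) le_rfl a

theorem pvCol_of_noDouble (l : List Char) (h : ¬ ['/', '/'] <:+: l) : pvCol l = l := by
  match l with
  | [] => rfl
  | [a] => rfl
  | a :: b :: u =>
    have hab : ¬ (a = '/' ∧ b = '/') := by
      rintro ⟨rfl, rfl⟩
      exact h ⟨[], u, rfl⟩
    have h' : ¬ ['/', '/'] <:+: b :: u := fun hin => h (hin.trans (List.suffix_cons a (b :: u)).isInfix)
    rw [show pvCol (a :: b :: u) = a :: pvCol (b :: u) by simp [pvCol, hab]]
    rw [pvCol_of_noDouble (b :: u) h']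

theorem pvCol_head (n : Nat) : ∀ (t : List Char), t.length ≤ n → ∀ c, (pvCol (c :: t)).head? = some c := by
  induction n with
  | zero =>
    intro t h c
    have : t = [] := by cases t <;> simp_all
    subst this; rfl
  | succ n ih =>
    intro t h c
    match t with
    | [] => rfl
    | d :: v =>
      by_cases hcd : c = '/' ∧ d = '/'
      · obtain ⟨rfl, rfl⟩ := hcd
        rw [show pvCol ('/' :: '/' :: v) = pvCol ('/' :: v) by simp [pvCol]]
        exact ih v (by simp at h; omega) '/'
      · simp [pvCol, hcd]

theorem pvCol_noDouble (l : List Char) : ¬ ['/', '/'] <:+: pvCol l := by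
  match l with
  | [] => simp [pvCol]
  | [a] => intro h; have := h.length_le; simp [pvCol] at this
  | a :: b :: u =>
    by_cases hab : a = '/' ∧ b = '/'
    · rw [show pvCol (a :: b :: u) = pvCol (b :: u) by simp [pvCol, hab]]
      exact pvCol_noDouble (b :: u)
    · rw [show pvCol (a :: b :: u) = a :: pvCol (b :: u) by simp [pvCol, hab]]
      intro hin
      rcases List.infix_cons_iff.mp hin with hpre | hin'
      · -- ['/','/'] <+: a :: pvCol (b::u) : then a = '/' and pvCol (b::u) starts with '/'
        obtain ⟨w, hw⟩ := hpre
        injection hw with e1 hw2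
        -- pvCol (b::u) = '/' :: w ; but pvCol (b::u) starts with b
        have hhead : (pvCol (b :: u)).head? = some b := pvCol_head u.length u le_rfl b
        rw [← hw2] at hhead
        simp at hhead
        exact hab ⟨e1.symm, hhead.symm⟩
      · exact pvCol_noDouble (b :: u) hin'

theorem pv_replace_eq_ra (l : List Char) : PySem.Chars.replace l ['/', '/'] ['/'] = pvRa l := by
  unfold PySem.Chars.replace
  simp only [List.isEmpty_cons]
  exact (pv_go_spec l.length l [] le_rfl).trans (by simp)

theorem pv_collapse_eq (fuel : Nat) : ∀ (l : List Char), l.length ≤ fuel → aCollapseFuel fuel l = pvCol l := by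
  induction fuel with
  | zero =>
    intro l h
    have : l = [] := by cases l <;> simp_all
    subst this; rfl
  | succ fuel ih =>
    intro l h
    rw [aCollapseFuel]
    by_cases hin : PySem.Chars.isIn ['/', '/'] l = true
    · rw [if_pos hin, pv_replace_eq_ra]
      have hd := (PySem.Chars.isIn_iff_infix _ _).mp hin
      rw [ih (pvRa l) (by have := pvRa_length_lt l hd; omega)]
      exact pvCol_ra l
    · rw [if_neg hin]
      exact (pvCol_of_noDouble l (fun hd => hin ((PySem.Chars.isIn_iff_infix _ _).mpr hd))).symm

theorem pv_startswith_two (d : List Char) :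
    PySem.Chars.startswith d ['.', '/'] = true ↔ d[0]? = some '.' ∧ d[1]? = some '/' := by
  rw [PySem.Chars.startswith_iff]
  match d with
  | [] => simp
  | [a] => simp [List.cons_prefix_cons]
  | a :: b :: t =>
    simp only [List.cons_prefix_cons, List.nil_prefix, and_true, List.getElem?_cons_zero,
      List.getElem?_cons_succ, Option.some.injEq]
    constructor
    · rintro ⟨rfl, rfl⟩; exact ⟨rfl, rfl⟩
    · rintro ⟨rfl, rfl⟩; exact ⟨rfl, rfl⟩

theorem pv_dropDots_eq (m : List Char) : ∀ i, m.drop (bScan m i) = aDropDots (m.drop i) := by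
  intro i
  induction i using bScan.induct m with
  | case1 i h ih =>
    rw [bScan, dif_pos h, ih]
    conv_rhs => rw [aDropDots.eq_def]
    have hsw : PySem.Chars.startswith (m.drop i) ['.', '/'] = true := by
      rw [pv_startswith_two]
      simp only [List.getElem?_drop]
      exact ⟨by simpa using h.1, by simpa using h.2⟩
    rw [dif_pos hsw, PySem.List.slice_from _ (by norm_num), List.drop_drop]
    rfl
  | case2 i h =>
    rw [bScan, dif_neg h]
    conv_rhs => rw [aDropDots.eq_def]
    have hsw : ¬ PySem.Chars.startswith (m.drop i) ['.', '/'] = true := by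
      rw [pv_startswith_two]
      simp only [List.getElem?_drop]
      intro hc
      exact h ⟨by simpa using hc.1, by simpa using hc.2⟩
    rw [dif_neg hsw]

theorem pv_fold_rem (l : List Char) : ∀ acc, l.foldl bStep acc = acc ++ pvRem acc.getLast? l := by
  induction l with
  | nil => intro acc; simp [pvRem]
  | cons c t ih =>
    intro acc
    rw [List.foldl_cons]
    by_cases hc : c = '/' ∧ acc.getLast? = some '/'
    · have hne : acc ≠ [] := by rintro rfl; simp at hc
      rw [show bStep acc c = acc from if_pos ⟨hc.1, hne, hc.2⟩]
      rw [ih acc, show pvRem acc.getLast? (c :: t) = pvRem acc.getLast? t from if_pos hc]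
    · have : bStep acc c = acc ++ [c] := by
        unfold bStep
        rw [if_neg]
        rintro ⟨h1, h2, h3⟩; exact hc ⟨h1, h3⟩
      rw [this, ih (acc ++ [c])]
      rw [show pvRem acc.getLast? (c :: t) = c :: pvRem (some c) t from if_neg hc]
      simp

theorem pvCol_cons_eq_rem (t : List Char) : ∀ c, pvCol (c :: t) = c :: pvRem (some c) t := by
  induction t with
  | nil => intro c; rfl
  | cons b u ih =>
    intro c
    by_cases hcb : c = '/' ∧ b = '/'
    · obtain ⟨rfl, rfl⟩ := hcb
      rw [show pvCol ('/' :: '/' :: u) = pvCol ('/' :: u) by simp [pvCol]]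
      rw [ih '/']
      rw [show pvRem (some '/') ('/' :: u) = pvRem (some '/') u from if_pos ⟨rfl, rfl⟩]
    · rw [show pvCol (c :: b :: u) = c :: pvCol (b :: u) by simp [pvCol, hcb]]
      rw [ih b]
      rw [show pvRem (some c) (b :: u) = b :: pvRem (some b) u from
        if_neg (by rintro ⟨rfl, hb⟩; simp at hb; exact hcb ⟨hb, rfl⟩)]

theorem pvCol_eq_rem (l : List Char) : pvRem none l = pvCol l := by
  match l with
  | [] => rfl
  | c :: t =>
    rw [pvCol_cons_eq_rem t c]
    rw [show pvRem none (c :: t) = c :: pvRem (some c) t from if_neg (by rintro ⟨-, h⟩; simp at h)]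

theorem pv_final (l : List Char) (h : ¬ ['/', '/'] <:+: l) :
    (if String.ofList l ≠ "/" then String.ofList (aRstripSlash l) else String.ofList l)
      = String.ofList (if 1 < l.length ∧ l.getLast? = some '/' then l.dropLast else l) := by
  have hofl : (String.ofList l = "/") ↔ l = ['/'] := by
    constructor
    · intro he
      have := congrArg String.toList he
      simpa using this
    · rintro rfl; rfl
  by_cases hsl : l = ['/']
  · subst hsl
    rw [if_neg (by simp), if_neg (by simp)]
  · rw [if_pos (by simp [hofl, hsl])]
    congr 1
    -- now pure list fact
    unfold aRstripSlash
    match hr : l.reverse with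
    | [] =>
      have : l = [] := by simpa using congrArg List.reverse hr
      subst this; rfl
    | c :: r =>
      have hl : l = r.reverse ++ [c] := by
        have := congrArg List.reverse hr
        simpa using this
      by_cases hc : c = '/'
      · subst hc
        match r with
        | [] => exact absurd (by simpa using hl) hsl
        | d :: r' =>
          have hd : ¬ d = '/' := by
            rintro rfl
            exact h (by rw [hl]; exact ⟨r'.reverse, [], by simp⟩)
          rw [List.dropWhile_cons_of_pos (by simp)]
          rw [List.dropWhile_cons_of_neg (by simpa using hd)]
          rw [if_pos ⟨by rw [hl]; simp, by rw [hl]; simp⟩]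
          rw [hl]
          simp
      · rw [List.dropWhile_cons_of_neg (by simpa using hc)]
        rw [if_neg (by rintro ⟨-, hlast⟩; rw [hl] at hlast; simp at hlast; exact hc hlast)]
        simpa using (congrArg List.reverse hr).symm

-- ===== VERDICT (by name: the statement is the Claim_ definition above) =====
theorem normalize_path_pattern_py_spec : Claim_equal_normalize_path_pattern_py := by
  intro pattern _
  unfold Spec_normalize_path_pattern_py normalize_path_pattern_py normalize_path_pattern_py_alt
  simp only []
  set m := (PySem.Str.replace (PySem.Str.strip pattern) "\\" "/").toList with hm
  have hdrop : m.drop (bScan m 0) = aDropDots m := by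
    simpa using pv_dropDots_eq m 0
  rw [← hdrop]
  set l := m.drop (bScan m 0) with hl
  rw [pv_collapse_eq l.length l le_rfl]
  rw [pv_fold_rem l []]
  simp only [List.nil_append, List.getLast?_nil]
  rw [pvCol_eq_rem]
  exact pv_final (pvCol l) (pvCol_noDouble l)
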